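-- pv_equiv track=rewrite | github.com/Dakuur/UAB | 2o/2n sem/da/descomposicio.py | descRec
-- ===== SOURCE A (Python) =====
-- def descRec(l: list, i: int):
--     if l[i] > 1:
--         l[i] -= 1
--         if i == -1:
--             l.append(1)
--         else:
--             l[i+1] += 1
--     else:
--         descRec(l, i - 1)
--     return l
-- ===== SOURCE B (Python) =====
-- def _find(l, i):
--     # backward scan (with Python's negative-index wraparound) for the first cell > 1
--     while l[i] <= 1:
--         i -= 1
--     return i
--
--
-- def descRec(l, i):
--     i = _find(l, i)
--     l[i] -= 1
--     if i == -1: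
--         l.append(1)
--     else:
--         l[i + 1] += 1
--     return l
-- ===== Notes on version B (the rewrite author's own statement) =====
-- stated objective: alternative
-- what changed: A's tail recursion (recurse on i-1 with the mutation inlined in one branch) is replaced by a find-then-mutate decomposition: an explicit while loop first locates the index of the first cell > 1 scanning backwards, then a single mutation block decrements it and increments/appends its successor.
import Mathlib
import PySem

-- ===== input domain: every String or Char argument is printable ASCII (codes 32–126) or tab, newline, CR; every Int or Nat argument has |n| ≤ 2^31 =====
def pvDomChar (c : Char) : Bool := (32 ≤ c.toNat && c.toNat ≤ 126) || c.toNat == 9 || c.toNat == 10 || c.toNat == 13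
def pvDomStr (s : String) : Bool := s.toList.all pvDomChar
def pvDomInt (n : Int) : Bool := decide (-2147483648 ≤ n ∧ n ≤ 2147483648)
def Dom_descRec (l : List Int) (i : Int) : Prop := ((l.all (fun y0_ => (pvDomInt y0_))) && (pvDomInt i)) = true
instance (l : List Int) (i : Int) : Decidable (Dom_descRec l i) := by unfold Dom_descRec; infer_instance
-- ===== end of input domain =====

-- B replaces A's tail recursion by an explicit find-then-mutate decomposition (a while loop locating
-- the cell > 1, then one mutation block). Both versions mutate the Python list in place identically;
-- the equivalence proved here is about the returned value.

-- ===== PORT A =====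
-- literal transliteration of A's tail recursion; the 'none' branches are Python's IndexError,
-- excluded by Pre_descRec
def descRec (l : List Int) (i : Int) : List Int :=
  match h : PySem.List.pyGet? l i with
  | none => l
  | some v =>
    if 1 < v then
      let l' := PySem.List.pySetD l i (v - 1)
      if i = -1 then l' ++ [1]
      else
        match PySem.List.pyGet? l' (i + 1) with
        | none => l'
        | some w => PySem.List.pySetD l' (i + 1) (w + 1)
    else
      descRec l (i - 1)
termination_by (i + l.length + 1).toNat
decreasing_by
  have : ¬ (PySem.List.pyGet? l i = none) := by simp [h]
  rw [PySem.List.pyGet?_eq_none_iff] at this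
  have hr : PySem.Raise.InRange l.length i := not_not.mp this
  unfold PySem.Raise.InRange at hr
  omega

-- ===== PORT B =====
-- B-side helper: the 'while l[i] <= 1: i -= 1' loop of Source B (returns i unchanged on IndexError,
-- an input excluded by Pre_descRec)
def findUnit (l : List Int) (i : Int) : Int :=
  match h : PySem.List.pyGet? l i with
  | none => i
  | some v => if v ≤ 1 then findUnit l (i - 1) else i
termination_by (i + l.length + 1).toNat
decreasing_by
  have : ¬ (PySem.List.pyGet? l i = none) := by simp [h]
  rw [PySem.List.pyGet?_eq_none_iff] at this
  have hr : PySem.Raise.InRange l.length i := not_not.mp this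
  unfold PySem.Raise.InRange at hr
  omega

def descRec_alt (l : List Int) (i : Int) : List Int :=
  let j := findUnit l i
  match PySem.List.pyGet? l j with
  | none => l
  | some v =>
    let l' := PySem.List.pySetD l j (v - 1)
    if j = -1 then l' ++ [1]
    else
      match PySem.List.pyGet? l' (j + 1) with
      | none => l'
      | some w => PySem.List.pySetD l' (j + 1) (w + 1)

-- ===== PRECONDITION & SPEC =====
-- Pre_descRec = exactly the inputs where Python A returns (no IndexError/unbounded recursion):
-- the backward scan from i (with negative-index wraparound) meets a cell > 1 at some j ≥ -len(l)
-- before running off the front, and the follow-up write l[j+1] is in range (or j = -1).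
def Pre_descRec (l : List Int) (i : Int) : Prop :=
  i < (l.length : Int) ∧
  ∃ j ∈ PySem.List.pyRange (-(l.length : Int)) (i + 1) 1,
    1 < PySem.List.pyGetD l j 0 ∧
    (∀ j' ∈ PySem.List.pyRange (j + 1) (i + 1) 1, PySem.List.pyGetD l j' 0 ≤ 1) ∧
    (j = -1 ∨ j < (l.length : Int) - 1)
instance (l : List Int) (i : Int) : Decidable (Pre_descRec l i) := by
  unfold Pre_descRec; infer_instance

def pvWitness_descRec : List Int × Int := ([2], -1)

def Spec_descRec (l : List Int) (i : Int) (out : List Int) : Prop := out = descRec_alt l i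
instance (l : List Int) (i : Int) (out : List Int) : Decidable (Spec_descRec l i out) := by
  unfold Spec_descRec; infer_instance

-- ===== CLAIM (what is proved, stated in full; the proofs are below) =====
def Claim_equal_descRec : Prop :=
  ∀ (l : List Int) (i : Int), Dom_descRec l i → Pre_descRec l i → Spec_descRec l i (descRec l i)

-- ===== LEMMAS AND PROOFS =====

-- the two ports agree on every input (outside Pre_ both return junk in lockstep)
theorem descRec_eq_alt (l : List Int) (i : Int) : descRec l i = descRec_alt l i := by
  generalize hm : (i + l.length + 1).toNat = m
  induction m using Nat.strong_induction_on generalizing i with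
  | _ m ih =>
    rw [descRec, descRec_alt, findUnit]
    cases h : PySem.List.pyGet? l i with
    | none => simp [h]
    | some v =>
      by_cases hv : 1 < v
      · simp [h, hv, show ¬ v ≤ 1 by omega]
      · have hle : v ≤ 1 := by omega
        have hr : PySem.Raise.InRange l.length i := by
          have : ¬ (PySem.List.pyGet? l i = none) := by simp [h]
          rw [PySem.List.pyGet?_eq_none_iff] at this
          exact not_not.mp this
        unfold PySem.Raise.InRange at hr
        simp only [hv, if_false, hle, if_true]
        have := ih (i - 1 + l.length + 1).toNat (by omega) (i - 1) rfl
        rw [this, descRec_alt]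

-- ===== VERDICT (by name: the statement is the Claim_ definition above) =====
theorem descRec_spec : Claim_equal_descRec := by
  intro l i _ _
  unfold Spec_descRec
  exact descRec_eq_alt l i
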